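-- pv_equiv track=rewrite | github.com/trongtranlee/leetcode | 2656-Maximum_sum_with_exactly_k_elements.py | maximizeSum
-- ===== SOURCE A (Python) =====
-- def maximizeSum(nums, k):
--     """
--     :type nums: List[int]
--     :type k: int
--     :rtype: int
--     """
--     maximum = max(nums)
--     ans = 0
--
--     while k:
--         ans += maximum
--         maximum += 1
--         k -= 1
--
--     return ans
-- ===== SOURCE B (Python) =====
-- def maximizeSum(nums, k):
--     # closed-form arithmetic series: k*max + 0+1+...+(k-1)
--     return k * max(nums) + k * (k - 1) // 2
-- ===== Notes on version B (the rewrite author's own statement) =====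
-- stated objective: simpler
-- what changed: replaces the k-iteration accumulation loop by the closed-form arithmetic-series formula k*max(nums) + k*(k-1)//2
import Mathlib
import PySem

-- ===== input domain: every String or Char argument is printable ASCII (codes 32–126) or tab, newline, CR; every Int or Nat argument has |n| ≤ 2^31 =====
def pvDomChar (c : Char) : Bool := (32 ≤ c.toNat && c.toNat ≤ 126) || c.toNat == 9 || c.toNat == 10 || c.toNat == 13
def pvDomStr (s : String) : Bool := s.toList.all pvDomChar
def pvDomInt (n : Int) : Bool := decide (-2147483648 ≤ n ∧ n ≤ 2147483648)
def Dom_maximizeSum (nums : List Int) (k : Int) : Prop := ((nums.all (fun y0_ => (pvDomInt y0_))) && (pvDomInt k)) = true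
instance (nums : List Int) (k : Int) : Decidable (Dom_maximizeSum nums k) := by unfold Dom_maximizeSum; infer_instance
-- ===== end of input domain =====

-- B replaces A's k-step accumulation loop with the closed-form arithmetic-series formula (simpler; max(nums) still dominates the cost).

-- ===== PORT A =====
-- the while-loop: n remaining iterations, state (maximum, ans)
def maximizeSumLoop (maximum ans : Int) : Nat → Int
  | 0 => ans
  | n + 1 => maximizeSumLoop (maximum + 1) (ans + maximum) n

def maximizeSum (nums : List Int) (k : Int) : Int :=
  match PySem.List.max? nums (fun x => x) with
  | none => 0          -- unreachable under Pre_ (max([]) raises ValueError)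
  | some maximum => maximizeSumLoop maximum 0 k.toNat

-- ===== PORT B =====
def maximizeSum_alt (nums : List Int) (k : Int) : Int :=
  match PySem.List.max? nums (fun x => x) with
  | none => 0          -- unreachable under Pre_ (max([]) raises ValueError)
  | some m => k * m + PySem.Int.floordiv (k * (k - 1)) 2

-- ===== PRECONDITION & SPEC =====
-- A raises ValueError on empty nums and loops forever for negative k; both excluded.
def Pre_maximizeSum (nums : List Int) (k : Int) : Prop := nums ≠ [] ∧ 0 ≤ k
instance (nums : List Int) (k : Int) : Decidable (Pre_maximizeSum nums k) := by unfold Pre_maximizeSum; infer_instance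
def pvWitness_maximizeSum : List Int × Int := ([3, 1, 2], 4)

def Spec_maximizeSum (nums : List Int) (k : Int) (out : Int) : Prop := out = maximizeSum_alt nums k
instance (nums : List Int) (k : Int) (out : Int) : Decidable (Spec_maximizeSum nums k out) := by unfold Spec_maximizeSum; infer_instance

-- ===== CLAIM =====
def Claim_equal_maximizeSum : Prop := ∀ (nums : List Int) (k : Int), Dom_maximizeSum nums k → Pre_maximizeSum nums k → Spec_maximizeSum nums k (maximizeSum nums k)

-- ===== LEMMAS AND PROOFS =====
theorem maximizeSumLoop_eq (n : Nat) : ∀ (m a : Int),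
    maximizeSumLoop m a n = a + n * m + (n * (n - 1)) / 2 := by
  induction n with
  | zero => intro m a; simp [maximizeSumLoop]
  | succ n ih =>
    intro m a
    rw [maximizeSumLoop, ih]
    have h2 : ((n + 1 : Nat) : Int) = (n : Int) + 1 := by push_cast; ring
    rw [h2]
    have hev : ∃ q : Int, (n : Int) * ((n : Int) - 1) = 2 * q ∧ ((n : Int) + 1) * ((n : Int) + 1 - 1) = 2 * (q + n) := by
      rcases Int.even_or_odd (n : Int) with ⟨c, hc⟩ | ⟨c, hc⟩
      · exact ⟨c * ((n : Int) - 1), by rw [hc]; ring, by rw [hc]; ring⟩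
      · exact ⟨(n : Int) * c, by rw [hc]; ring, by rw [hc]; ring⟩
    obtain ⟨q, h1, h3⟩ := hev
    rw [h1, h3, Int.mul_ediv_cancel_left _ (by norm_num), Int.mul_ediv_cancel_left _ (by norm_num)]
    ring

-- ===== VERDICT =====
theorem maximizeSum_spec : Claim_equal_maximizeSum := by
  intro nums k _ ⟨hne, hk⟩
  unfold Spec_maximizeSum maximizeSum maximizeSum_alt
  cases hmax : PySem.List.max? nums (fun x => x) with
  | none => rfl
  | some m =>
    simp only
    rw [maximizeSumLoop_eq]
    have hkn : ((k.toNat : Nat) : Int) = k := Int.toNat_of_nonneg hk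
    rw [hkn, PySem.Int.floordiv_eq_ediv_of_pos (b := 2) (by norm_num)]
    ring
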